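-- pv_equiv track=rewrite | github.com/ajanvaraus/AdventOfCode2024 | day_2/main2.py | check
-- ===== SOURCE A (Python) =====
-- def check(levels) :
--     safeAsc = 0
--     safeDes = 0
--     tempLevel = levels[0]
--
--     for level in levels :
--         levels[levels.index(level)] = int(level)
--         level = int(level)
--
--         if (levels.index(level) != 0) :
--             if tempLevel < level and level-tempLevel <= 3:
--                 safeAsc += 1
--                 safeDes = 0
--             elif tempLevel > level and tempLevel-level <= 3:
--                 safeDes += 1
--                 safeAsc = 0
--
--         tempLevel = level
--
--     if safeAsc == len(levels)-1 or safeDes == len(levels)-1 :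
--         return 1
--     else :
--         return 0
-- ===== SOURCE B (Python) =====
-- def check(levels):
--     # Single pass over adjacent differences: safe iff every diff between 1 and 3, or every diff between -1 and -3.
--     diffs = [b - a for a, b in zip(levels, levels[1:])]
--     if all(1 <= d <= 3 for d in diffs) or all(-3 <= d <= -1 for d in diffs):
--         return 1
--     return 0
-- ===== Notes on version B (the rewrite author's own statement) =====
-- stated objective: faster
-- what changed: Replaces the counter loop with repeated O(n) levels.index scans (and no-op list writes) by a single adjacent-difference pass checking every diff lies between 1 and 3, or every diff between -1 and -3.
import Mathlib
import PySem

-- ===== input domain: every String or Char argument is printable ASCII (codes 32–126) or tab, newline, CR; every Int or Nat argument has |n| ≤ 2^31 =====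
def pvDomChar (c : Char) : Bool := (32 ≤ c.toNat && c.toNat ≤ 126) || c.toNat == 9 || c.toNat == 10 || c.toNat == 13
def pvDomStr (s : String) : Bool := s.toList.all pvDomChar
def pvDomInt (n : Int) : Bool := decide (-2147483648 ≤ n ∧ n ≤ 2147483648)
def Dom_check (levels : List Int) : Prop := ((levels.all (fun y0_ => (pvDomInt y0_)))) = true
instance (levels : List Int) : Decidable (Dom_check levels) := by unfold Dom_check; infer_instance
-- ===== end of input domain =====

-- B replaces A's counter loop with repeated O(n) list.index scans by one adjacent-difference
-- pass (every diff between 1 and 3, or every diff between -1 and -3); A also writes levels[i] = int(levels[i]) in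
-- place (a no-op for int inputs), B does not mutate — equivalence is about the return value.

-- ===== PORT A =====
-- loop body of A's for-loop (state: safeAsc, safeDes, tempLevel, levels-list).
-- levels[levels.index(level)] = int(level): int() is the identity on ints, so the write
-- stores back the value already there; iteration over the mutated list therefore sees the
-- same elements as the original and is ported as a foldl over the input list.
def checkStep (st : Int × Int × Int × List Int) (level : Int) : Int × Int × Int × List Int :=
  let lv := match PySem.List.index? st.2.2.2 level with
            | some i => st.2.2.2.set i level
            | none => st.2.2.2
  if PySem.List.index? lv level ≠ some 0 then
    if st.2.2.1 < level ∧ level - st.2.2.1 ≤ 3 then (st.1 + 1, 0, level, lv)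
    else if st.2.2.1 > level ∧ st.2.2.1 - level ≤ 3 then (0, st.2.1 + 1, level, lv)
    else (st.1, st.2.1, level, lv)
  else (st.1, st.2.1, level, lv)

def check (levels : List Int) : Int :=
  match PySem.List.pyGet? levels 0 with
  | none => 0  -- the first-element access raises IndexError in Python; excluded by Pre_check
  | some tempLevel =>
    let st := levels.foldl checkStep (0, 0, tempLevel, levels)
    if st.1 = (levels.length : Int) - 1 ∨ st.2.1 = (levels.length : Int) - 1 then 1 else 0

-- ===== PORT B =====
def check_alt (levels : List Int) : Int :=
  let diffs := (levels.zip (PySem.List.slice levels (some 1) none)).map (fun p => p.2 - p.1)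
  if (diffs.all fun d => decide (1 ≤ d ∧ d ≤ 3)) || (diffs.all fun d => decide (-3 ≤ d ∧ d ≤ -1))
  then 1 else 0

-- ===== PRECONDITION & SPEC =====
-- Pre_check excludes only the empty list, on which A raises IndexError at its initial first-element access.
def Pre_check (levels : List Int) : Prop := levels ≠ []
instance (levels : List Int) : Decidable (Pre_check levels) := by unfold Pre_check; infer_instance
def pvWitness_check : List Int := [1, 2]

def Spec_check (levels : List Int) (out : Int) : Prop := out = check_alt levels
instance (levels : List Int) (out : Int) : Decidable (Spec_check levels out) := by unfold Spec_check; infer_instance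

-- ===== CLAIM (what is proved, stated in full; the proofs are below) =====
def Claim_equal_check : Prop := ∀ (levels : List Int), Dom_check levels → Pre_check levels → Spec_check levels (check levels)

-- ===== LEMMAS AND PROOFS =====

-- pure version of A's loop body once the list component is known to be unchanged
-- (first element t0 fixed; state: safeAsc, safeDes, tempLevel)
def stepA (t0 : Int) (st : Int × Int × Int) (x : Int) : Int × Int × Int :=
  if x ≠ t0 then
    if st.2.2 < x ∧ x - st.2.2 ≤ 3 then (st.1 + 1, 0, x)
    else if st.2.2 > x ∧ st.2.2 - x ≤ 3 then (0, st.2.1 + 1, x)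
    else (st.1, st.2.1, x)
  else (st.1, st.2.1, x)

-- A's counters with the loop's "index(level) ≠ 0" skip made explicit
def ascB (t0 temp : Int) : List Int → Bool
  | [] => true
  | x :: l => (decide (x ≠ t0) && decide (temp < x ∧ x - temp ≤ 3)) && ascB t0 x l

def descB (t0 temp : Int) : List Int → Bool
  | [] => true
  | x :: l => (decide (x ≠ t0) && decide (temp > x ∧ temp - x ≤ 3)) && descB t0 x l

-- plain chain conditions (what B checks)
def ascP (temp : Int) : List Int → Bool
  | [] => true
  | x :: l => decide (temp < x ∧ x - temp ≤ 3) && ascP x l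

def descP (temp : Int) : List Int → Bool
  | [] => true
  | x :: l => decide (temp > x ∧ temp - x ≤ 3) && descP x l

theorem set_index_self (lv : List Int) (v : Int) :
    (match PySem.List.index? lv v with
     | some i => lv.set i v
     | none => lv) = lv := by
  cases h : PySem.List.index? lv v with
  | none => rfl
  | some i =>
    obtain ⟨hi, hv, -⟩ := PySem.List.getElem_of_index?_eq_some h
    calc lv.set i v = lv.set i lv[i] := by rw [hv]
      _ = lv := List.set_getElem_self hi

theorem index?_zero_iff (t0 : Int) (tl : List Int) (v : Int) :
    PySem.List.index? (t0 :: tl) v = some 0 ↔ v = t0 := by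
  by_cases h : v = t0
  · subst h; rw [PySem.List.index?_cons_self]; simp
  · rw [PySem.List.index?_cons_of_ne tl (fun e => h e.symm)]
    cases hidx : PySem.List.index? tl v <;> simp [h]

theorem foldA (t0 : Int) (tl : List Int) :
    ∀ (l : List Int) (sa sd temp : Int),
      l.foldl checkStep (sa, sd, temp, t0 :: tl) =
        ((l.foldl (stepA t0) (sa, sd, temp)).1,
         (l.foldl (stepA t0) (sa, sd, temp)).2.1,
         (l.foldl (stepA t0) (sa, sd, temp)).2.2, t0 :: tl) := by
  intro l
  induction l with
  | nil => intro sa sd temp; rfl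
  | cons x l ih =>
    intro sa sd temp
    have hset := set_index_self (t0 :: tl) x
    have hstep : checkStep (sa, sd, temp, t0 :: tl) x =
        ((stepA t0 (sa, sd, temp) x).1, (stepA t0 (sa, sd, temp) x).2.1,
         (stepA t0 (sa, sd, temp) x).2.2, t0 :: tl) := by
      unfold checkStep stepA
      simp only [hset, ne_eq, index?_zero_iff]
      split_ifs <;> rfl
    simp only [List.foldl_cons, hstep, stepA]
    split_ifs <;> exact ih _ _ _

theorem foldUB (t0 : Int) : ∀ (l : List Int) (sa sd temp : Int), 0 ≤ sa → 0 ≤ sd →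
    (0 ≤ (l.foldl (stepA t0) (sa, sd, temp)).1 ∧
     0 ≤ (l.foldl (stepA t0) (sa, sd, temp)).2.1 ∧
     (l.foldl (stepA t0) (sa, sd, temp)).1 ≤ sa + l.length ∧
     (l.foldl (stepA t0) (sa, sd, temp)).2.1 ≤ sd + l.length) := by
  intro l
  induction l with
  | nil => intro sa sd temp h1 h2; simpa using ⟨h1, h2⟩
  | cons x l ih =>
    intro sa sd temp h1 h2
    simp only [List.foldl_cons, stepA, List.length_cons]
    split_ifs
    all_goals
      first
      | (obtain ⟨a, b, c, d⟩ := ih (sa + 1) 0 x (by omega) (by omega)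
         exact ⟨a, b, by push_cast; omega, by push_cast; omega⟩)
      | (obtain ⟨a, b, c, d⟩ := ih 0 (sd + 1) x (by omega) (by omega)
         exact ⟨a, b, by push_cast; omega, by push_cast; omega⟩)
      | (obtain ⟨a, b, c, d⟩ := ih sa sd x (by omega) (by omega)
         exact ⟨a, b, by push_cast; omega, by push_cast; omega⟩)

theorem foldAsc (t0 : Int) : ∀ (l : List Int) (sa sd temp : Int), 0 ≤ sa → 0 ≤ sd →
    ((l.foldl (stepA t0) (sa, sd, temp)).1 = sa + l.length ↔ ascB t0 temp l = true) := by
  intro l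
  induction l with
  | nil => intro sa sd temp _ _; simp [ascB]
  | cons x l ih =>
    intro sa sd temp h1 h2
    simp only [List.foldl_cons, stepA, List.length_cons, ascB]
    push_cast
    by_cases hx : x = t0
    · rw [if_neg (show ¬ x ≠ t0 by simpa using hx)]
      obtain ⟨-, -, c, -⟩ := foldUB t0 l sa sd x h1 h2
      constructor
      · intro h; exfalso; omega
      · intro h; simp [hx] at h
    · rw [if_pos hx]
      by_cases ha : temp < x ∧ x - temp ≤ 3
      · rw [if_pos ha]
        have hih := ih (sa + 1) 0 x (by omega) (by omega)
        rw [show sa + ((l.length : Int) + 1) = sa + 1 + (l.length : Int) by ring, hih]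
        simp [hx, ha]
      · rw [if_neg ha]
        split_ifs with hd
        · obtain ⟨-, -, c, -⟩ := foldUB t0 l 0 (sd + 1) x (by omega) (by omega)
          constructor
          · intro h; exfalso; omega
          · intro h; exfalso; simp only [Bool.and_eq_true, decide_eq_true_eq] at h; obtain ⟨⟨-, hlt, hle⟩, -⟩ := h; omega
        · obtain ⟨-, -, c, -⟩ := foldUB t0 l sa sd x h1 h2
          constructor
          · intro h; exfalso; omega
          · intro h; exfalso; simp only [Bool.and_eq_true, decide_eq_true_eq] at h; obtain ⟨⟨-, hlt, hle⟩, -⟩ := h; omega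

theorem foldDesc (t0 : Int) : ∀ (l : List Int) (sa sd temp : Int), 0 ≤ sa → 0 ≤ sd →
    ((l.foldl (stepA t0) (sa, sd, temp)).2.1 = sd + l.length ↔ descB t0 temp l = true) := by
  intro l
  induction l with
  | nil => intro sa sd temp _ _; simp [descB]
  | cons x l ih =>
    intro sa sd temp h1 h2
    simp only [List.foldl_cons, stepA, List.length_cons, descB]
    push_cast
    by_cases hx : x = t0
    · rw [if_neg (show ¬ x ≠ t0 by simpa using hx)]
      obtain ⟨-, -, -, c⟩ := foldUB t0 l sa sd x h1 h2
      constructor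
      · intro h; exfalso; omega
      · intro h; simp [hx] at h
    · rw [if_pos hx]
      by_cases ha : temp < x ∧ x - temp ≤ 3
      · rw [if_pos ha]
        obtain ⟨-, -, -, c⟩ := foldUB t0 l (sa + 1) 0 x (by omega) (by omega)
        constructor
        · intro h; exfalso; omega
        · intro h; exfalso; simp only [Bool.and_eq_true, decide_eq_true_eq] at h; obtain ⟨⟨-, hlt, hle⟩, -⟩ := h; omega
      · rw [if_neg ha]
        by_cases hd : temp > x ∧ temp - x ≤ 3
        · rw [if_pos hd]
          have hih := ih 0 (sd + 1) x (by omega) (by omega)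
          rw [show sd + ((l.length : Int) + 1) = sd + 1 + (l.length : Int) by ring, hih]
          simp [hx, hd]
        · rw [if_neg hd]
          obtain ⟨-, -, -, c⟩ := foldUB t0 l sa sd x h1 h2
          constructor
          · intro h; exfalso; omega
          · intro h; exfalso; simp only [Bool.and_eq_true, decide_eq_true_eq] at h; obtain ⟨⟨-, hlt, hle⟩, -⟩ := h; omega

-- on an ascending chain every element exceeds temp ≥ t0, so the "≠ t0" skip never fires
theorem ascB_eq_ascP (t0 : Int) : ∀ (l : List Int) (temp : Int), t0 ≤ temp →
    ascB t0 temp l = ascP temp l := by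
  intro l
  induction l with
  | nil => intro temp _; rfl
  | cons x l ih =>
    intro temp h
    by_cases ha : temp < x ∧ x - temp ≤ 3
    · have hx : x ≠ t0 := by omega
      simp [ascB, ascP, ha, hx, ih x (by omega)]
    · simp only [ascB, ascP, decide_eq_false ha, Bool.and_false, Bool.false_and]

theorem descB_eq_descP (t0 : Int) : ∀ (l : List Int) (temp : Int), temp ≤ t0 →
    descB t0 temp l = descP temp l := by
  intro l
  induction l with
  | nil => intro temp _; rfl
  | cons x l ih =>
    intro temp h
    by_cases ha : temp > x ∧ temp - x ≤ 3
    · have hx : x ≠ t0 := by omega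
      simp [descB, descP, ha, hx, ih x (by omega)]
    · simp only [descB, descP, decide_eq_false ha, Bool.and_false, Bool.false_and]

theorem ascP_eq_all : ∀ (l : List Int) (temp : Int),
    ((((temp :: l).zip l).map (fun p => p.2 - p.1)).all fun d => decide (1 ≤ d ∧ d ≤ 3)) =
      ascP temp l := by
  intro l
  induction l with
  | nil => intro temp; rfl
  | cons x l ih =>
    intro temp
    simp only [List.zip_cons_cons, List.map_cons, List.all_cons, ascP, ih x]
    congr 1
    simp only [decide_eq_decide]
    omega

theorem descP_eq_all : ∀ (l : List Int) (temp : Int),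
    ((((temp :: l).zip l).map (fun p => p.2 - p.1)).all fun d => decide (-3 ≤ d ∧ d ≤ -1)) =
      descP temp l := by
  intro l
  induction l with
  | nil => intro temp; rfl
  | cons x l ih =>
    intro temp
    simp only [List.zip_cons_cons, List.map_cons, List.all_cons, descP, ih x]
    congr 1
    simp only [decide_eq_decide]
    omega

-- ===== VERDICT (by name: the statement is the Claim_ definition above) =====
theorem check_spec : Claim_equal_check := by
  intro levels _ hpre
  unfold Spec_check
  match levels with
  | [] => exact absurd rfl hpre
  | t0 :: rest =>
    unfold check check_alt
    rw [PySem.List.slice_from_one]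
    simp only [PySem.List.pyGet?_zero_cons, List.foldl_cons, List.tail_cons]
    have hfirst : checkStep (0, 0, t0, t0 :: rest) t0 = (0, 0, t0, t0 :: rest) := by
      unfold checkStep
      rw [set_index_self]
      simp
    simp only [hfirst, foldA t0 rest rest 0 0 t0]
    have hlen : ((t0 :: rest).length : Int) - 1 = (rest.length : Int) := by
      push_cast [List.length_cons]; ring
    rw [hlen]
    have hasc := foldAsc t0 rest 0 0 t0 le_rfl le_rfl
    have hdesc := foldDesc t0 rest 0 0 t0 le_rfl le_rfl
    simp only [zero_add] at hasc hdesc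
    have hcond : ((rest.foldl (stepA t0) (0, 0, t0)).1 = (rest.length : Int) ∨
        (rest.foldl (stepA t0) (0, 0, t0)).2.1 = (rest.length : Int)) ↔
        (((((t0 :: rest).zip rest).map (fun p => p.2 - p.1)).all fun d => decide (1 ≤ d ∧ d ≤ 3)) ||
         ((((t0 :: rest).zip rest).map (fun p => p.2 - p.1)).all fun d => decide (-3 ≤ d ∧ d ≤ -1))) = true := by
      rw [hasc, hdesc, ascB_eq_ascP t0 rest t0 le_rfl, descB_eq_descP t0 rest t0 le_rfl,
        ascP_eq_all rest t0, descP_eq_all rest t0]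
      simp
    split_ifs with h1 h2 h2 <;> first
      | rfl
      | (exact absurd (hcond.mp h1) (by simpa using h2))
      | (exact absurd (hcond.mpr (by simpa using h2)) h1)
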